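-- pv_equiv track=rewrite | github.com/SpaceJ0392/coding_test | before/mock_exam.py | solution
-- ===== SOURCE A (Python) =====
-- def solution(answers):
--     answer = []
--
--     person1 = [1, 2, 3, 4, 5]
--     person2 = [2, 1, 2, 3, 2, 4, 2, 5]
--     person3 = [3, 3, 1, 1, 2, 2, 4, 4, 5, 5]
--
--     solve = [0, 0, 0]
--     for i in range(len(answers)):
--         if person1[i % 5] == answers[i]:
--             solve[0] += 1
--         if person2[i % 8] == answers[i]:
--             solve[1] += 1
--         if person3[i % 10] == answers[i]:
--             solve[2] += 1
--
--     for idx, val in enumerate(solve):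
--         if val == max(solve):
--             answer.append(idx + 1)
--
--     return answer
-- ===== SOURCE B (Python) =====
-- def _score(p, xs):
--     # block decomposition: walk the answers one pattern-length chunk at a time
--     # and compare each chunk element-wise with the whole pattern via zip
--     k, s, i = len(p), 0, 0
--     while i < len(xs):
--         s += sum(a == b for a, b in zip(xs[i:i+k], p))
--         i += k
--     return s
--
--
-- def solution(answers):
--     patterns = [[1, 2, 3, 4, 5],
--                 [2, 1, 2, 3, 2, 4, 2, 5],
--                 [3, 3, 1, 1, 2, 2, 4, 4, 5, 5]]
--     scores = [_score(p, answers) for p in patterns]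
--     m = max(scores)
--     return [i + 1 for i, v in enumerate(scores) if v == m]
-- ===== Notes on version B (the rewrite author's own statement) =====
-- stated objective: alternative
-- what changed: Replaces A's single indexed loop with modular pattern lookups by a block decomposition: each score is computed by walking the answers one pattern-length chunk at a time and comparing each chunk element-wise with the whole pattern via zip (no index arithmetic modulo the pattern length), then max-and-filter over the three scores.
import Mathlib
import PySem

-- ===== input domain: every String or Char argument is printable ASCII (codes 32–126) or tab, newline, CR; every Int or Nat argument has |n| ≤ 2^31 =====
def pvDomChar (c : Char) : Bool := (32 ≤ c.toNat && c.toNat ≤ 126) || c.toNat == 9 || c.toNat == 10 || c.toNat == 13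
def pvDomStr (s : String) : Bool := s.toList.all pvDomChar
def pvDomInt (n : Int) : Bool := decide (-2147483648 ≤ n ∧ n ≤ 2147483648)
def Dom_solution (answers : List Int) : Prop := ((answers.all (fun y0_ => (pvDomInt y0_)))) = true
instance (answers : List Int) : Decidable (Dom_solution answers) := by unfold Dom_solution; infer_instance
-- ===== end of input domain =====

-- B replaces A's indexed loop with modular pattern lookups by a recursive block
-- decomposition (peel pattern-length chunks, compare chunkwise with zip), then
-- max-and-filter (objective: alternative).

-- ===== PORT A =====
-- one interleaved loop over range(len(answers)) updating the triple solve;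
-- pyGetD with default 0 is exact: every index used is in range.
def solution (answers : List Int) : List Int :=
  let person1 : List Int := [1, 2, 3, 4, 5]
  let person2 : List Int := [2, 1, 2, 3, 2, 4, 2, 5]
  let person3 : List Int := [3, 3, 1, 1, 2, 2, 4, 4, 5, 5]
  let solve : Int × Int × Int :=
    (PySem.List.pyRange 0 (PySem.List.len answers) 1).foldl
      (fun s i =>
        let a := PySem.List.pyGetD answers i 0
        let s0 := if PySem.List.pyGetD person1 (PySem.Int.mod i 5) 0 == a then s.1 + 1 else s.1
        let s1 := if PySem.List.pyGetD person2 (PySem.Int.mod i 8) 0 == a then s.2.1 + 1 else s.2.1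
        let s2 := if PySem.List.pyGetD person3 (PySem.Int.mod i 10) 0 == a then s.2.2 + 1 else s.2.2
        (s0, s1, s2)) (0, 0, 0)
  let solveL : List Int := [solve.1, solve.2.1, solve.2.2]
  (PySem.List.enumerate solveL 0).foldl
    (fun answer p =>
      if p.2 == (PySem.List.max? solveL (fun x => x)).getD 0 then answer ++ [p.1 + 1] else answer) []

-- ===== PORT B =====
-- _score from Source B: while-loop over chunk start indices; the fuel argument is
-- only a totality guard (each iteration advances i by len(p) ≥ 1 for the
-- nonempty patterns used, so fuel = xs.length suffices and never alters the
-- computed value).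
def pvScoreW : Nat → List Int → List Int → Nat → Int → Int
  | 0, _, _, _, s => s
  | fuel + 1, p, xs, i, s =>
    if i < xs.length then
      pvScoreW fuel p xs (i + p.length)
        (s + (((PySem.List.slice xs (some (i : Int)) (some ((i : Int) + PySem.List.len p))).zip p).map
            (fun q => if q.1 == q.2 then (1 : Int) else 0)).sum)
    else s

def pvScore (p : List Int) (xs : List Int) : Int := pvScoreW xs.length p xs 0 0

def solution_alt (answers : List Int) : List Int :=
  let patterns : List (List Int) :=
    [[1, 2, 3, 4, 5], [2, 1, 2, 3, 2, 4, 2, 5], [3, 3, 1, 1, 2, 2, 4, 4, 5, 5]]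
  let scores : List Int := patterns.map (fun p => pvScore p answers)
  let m : Int := (PySem.List.max? scores (fun x => x)).getD 0
  (PySem.List.enumerate scores 0).foldl
    (fun out q => if q.2 == m then out ++ [q.1 + 1] else out) []

-- ===== PRECONDITION & SPEC =====
def Spec_solution (answers : List Int) (out : List Int) : Prop := out = solution_alt answers
instance (answers : List Int) (out : List Int) : Decidable (Spec_solution answers out) := by unfold Spec_solution; infer_instance

-- ===== CLAIM (what is proved, stated in full; the proofs are below) =====
def Claim_equal_solution : Prop := ∀ (answers : List Int), Dom_solution answers → Spec_solution answers (solution answers)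

-- ===== LEMMAS AND PROOFS =====

-- A's index loop over range(len(answers)) is a loop over enumerate(answers)
theorem pv_loop_enum {σ : Type} (answers : List Int) (F : σ → Int → Int → σ) (init : σ) :
    (PySem.List.pyRange 0 (PySem.List.len answers) 1).foldl
      (fun s i => F s i (PySem.List.pyGetD answers i 0)) init
    = (PySem.List.enumerate answers 0).foldl (fun s q => F s q.1 q.2) init := by
  rw [PySem.List.enumerate_eq_map_pyRange (d := 0), List.foldl_map]

-- A's per-pattern count, as a countP over enumerate
def pvPred (p : List Int) (k : Int) (q : Int × Int) : Bool :=
  PySem.List.pyGetD p (PySem.Int.mod q.1 k) 0 == q.2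

-- shifting every index by the modulus does not change the count
theorem pv_shift (p : List Int) (k : Int) :
    ∀ (ys : List Int) (s : Int),
      (PySem.List.enumerate ys (s + k)).countP (pvPred p k)
        = (PySem.List.enumerate ys s).countP (pvPred p k) := by
  intro ys
  induction ys with
  | nil => intro s; rfl
  | cons y t ih =>
    intro s
    rw [PySem.List.enumerate_cons, PySem.List.enumerate_cons,
        List.countP_cons, List.countP_cons]
    have h1 : PySem.Int.mod (s + k) k = PySem.Int.mod s k := by
      simp [PySem.Int.mod]
    have h2 : s + k + 1 = (s + 1) + k := by ring
    rw [h2, ih (s + 1)]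
    simp [pvPred, h1]

-- on a chunk no longer than the pattern the modular lookup is a plain zip
theorem pv_chunk (p : List Int) :
    ∀ (c : List Int) (o : Nat), o + c.length ≤ p.length →
      (PySem.List.enumerate c (o : Int)).countP (pvPred p (p.length : Int))
        = (c.zip (p.drop o)).countP (fun q => q.1 == q.2) := by
  intro c
  induction c with
  | nil => intro o _; simp [PySem.List.enumerate_nil]
  | cons x t ih =>
    intro o h
    have h' := h
    simp only [List.length_cons] at h'
    have ho : o < p.length := by omega
    have hmod : PySem.Int.mod (o : Int) (p.length : Int) = (o : Int) := by
      simp [PySem.Int.mod]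
      rw [Int.fmod_eq_emod]
      simp
      exact Int.emod_eq_of_lt (by positivity) (by exact_mod_cast ho)
    have hget : PySem.List.pyGetD p (o : Int) 0 = p[o] := by
      simp [PySem.List.pyGetD, PySem.List.pyGet?, PySem.List.pyIdx?, ho]
    rw [PySem.List.enumerate_cons, List.countP_cons,
        List.drop_eq_getElem_cons ho]
    simp only [List.zip_cons_cons, List.countP_cons]
    have hcast : ((o : Int) + 1) = ((o + 1 : Nat) : Int) := by push_cast; ring
    rw [hcast, ih (o + 1) (by omega)]
    by_cases hx : x = p[o] <;> simp [pvPred, hmod, hget, hx, Ne.symm]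

-- B's while loop from index i scores the suffix xs.drop i
theorem pvW_count (p : List Int) (hp : p ≠ []) :
    ∀ (fuel : Nat) (i : Nat) (s : Int) (xs : List Int), xs.length - i ≤ fuel →
      pvScoreW fuel p xs i s
        = s + ((PySem.List.enumerate (xs.drop i) 0).countP (pvPred p (p.length : Int)) : Int) := by
  intro fuel
  induction fuel with
  | zero =>
    intro i s xs h
    have hi : xs.length ≤ i := by omega
    rw [List.drop_eq_nil_of_le hi]
    simp [pvScoreW, PySem.List.enumerate_nil]
  | succ fuel ih =>
    intro i s xs h
    rw [pvScoreW]
    by_cases hi : i < xs.length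
    · rw [if_pos hi]
      have hk : 0 < p.length := List.length_pos_iff.mpr hp
      rw [ih (i + p.length) _ xs (by omega)]
      -- the scored chunk is (xs.drop i).take p.length
      simp only [PySem.List.len_eq, PySem.List.slice_natCast_add,
        PySem.List.sum_map_ite_one_zero]
      -- split the suffix into its first chunk and the rest
      conv_rhs => rw [← List.take_append_drop p.length (xs.drop i)]
      rw [PySem.List.enumerate_append, List.countP_append]
      have hchunk := pv_chunk p ((xs.drop i).take p.length) 0 (by simp)
      simp only [Nat.cast_zero, List.drop_zero] at hchunk
      rw [hchunk, List.drop_drop]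
      by_cases hrest : p.length ≤ (xs.drop i).length
      · have hlen : ((xs.drop i).take p.length).length = p.length := by
          simp [List.length_drop] at hrest ⊢
          omega
        rw [hlen, pv_shift p (p.length : Int) (xs.drop (i + p.length)) 0]
        push_cast
        ring
      · have hdrop : xs.drop (i + p.length) = [] := by
          rw [List.drop_eq_nil_iff]
          simp [List.length_drop] at hrest ⊢
          omega
        rw [hdrop]
        simp [PySem.List.enumerate_nil]
    · rw [if_neg hi]
      rw [List.drop_eq_nil_of_le (by omega)]
      simp [PySem.List.enumerate_nil]

-- the countP over enumerate equals B's chunk scorer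
theorem pv_main (p : List Int) (hp : p ≠ []) (xs : List Int) :
    ((PySem.List.enumerate xs 0).countP (pvPred p (p.length : Int)) : Int)
      = pvScore p xs := by
  rw [pvScore, pvW_count p hp xs.length 0 0 xs (by omega)]
  simp

-- A's enumerate-foldl counter is a countP
theorem pv_count (p : List Int) (k : Int) (xs : List Int) :
    (PySem.List.enumerate xs 0).foldl
      (fun (s : Int) q => if PySem.List.pyGetD p (PySem.Int.mod q.1 k) 0 == q.2 then s + 1 else s) 0
      = ((PySem.List.enumerate xs 0).countP (pvPred p k) : Int) := by
  rw [PySem.List.foldl_if_add_one]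
  simp only [zero_add]
  rfl

-- ===== VERDICT (by name: the statement is the Claim_ definition above) =====
theorem pv_score_eq (p : List Int) (hp : p ≠ []) (k : Int) (hk : k = (p.length : Int)) (xs : List Int) :
    (PySem.List.enumerate xs 0).foldl
      (fun (s : Int) q => if PySem.List.pyGetD p (PySem.Int.mod q.1 k) 0 == q.2 then s + 1 else s) 0
      = pvScore p xs := by
  subst hk
  rw [pv_count, pv_main p hp xs]

theorem pv_solve_eq (answers : List Int) :
    (PySem.List.pyRange 0 (PySem.List.len answers) 1).foldl
      (fun (s : Int × Int × Int) i =>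
        let a := PySem.List.pyGetD answers i 0
        let s0 := if PySem.List.pyGetD ([1,2,3,4,5] : List Int) (PySem.Int.mod i 5) 0 == a then s.1 + 1 else s.1
        let s1 := if PySem.List.pyGetD ([2,1,2,3,2,4,2,5] : List Int) (PySem.Int.mod i 8) 0 == a then s.2.1 + 1 else s.2.1
        let s2 := if PySem.List.pyGetD ([3,3,1,1,2,2,4,4,5,5] : List Int) (PySem.Int.mod i 10) 0 == a then s.2.2 + 1 else s.2.2
        (s0, s1, s2)) (0, 0, 0)
    = (pvScore [1,2,3,4,5] answers, pvScore [2,1,2,3,2,4,2,5] answers,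
       pvScore [3,3,1,1,2,2,4,4,5,5] answers) := by
  rw [pv_loop_enum answers
      (fun (s : Int × Int × Int) i a =>
        (if PySem.List.pyGetD ([1,2,3,4,5] : List Int) (PySem.Int.mod i 5) 0 == a then s.1 + 1 else s.1,
         if PySem.List.pyGetD ([2,1,2,3,2,4,2,5] : List Int) (PySem.Int.mod i 8) 0 == a then s.2.1 + 1 else s.2.1,
         if PySem.List.pyGetD ([3,3,1,1,2,2,4,4,5,5] : List Int) (PySem.Int.mod i 10) 0 == a then s.2.2 + 1 else s.2.2))]
  rw [PySem.List.foldl_prod_mk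
      (f := fun (acc : Int) (q : Int × Int) =>
        if PySem.List.pyGetD ([1,2,3,4,5] : List Int) (PySem.Int.mod q.1 5) 0 == q.2 then acc + 1 else acc)
      (g := fun (s : Int × Int) (q : Int × Int) =>
        (if PySem.List.pyGetD ([2,1,2,3,2,4,2,5] : List Int) (PySem.Int.mod q.1 8) 0 == q.2 then s.1 + 1 else s.1,
         if PySem.List.pyGetD ([3,3,1,1,2,2,4,4,5,5] : List Int) (PySem.Int.mod q.1 10) 0 == q.2 then s.2 + 1 else s.2))]
  rw [PySem.List.foldl_prod_mk
      (f := fun (acc : Int) (q : Int × Int) =>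
        if PySem.List.pyGetD ([2,1,2,3,2,4,2,5] : List Int) (PySem.Int.mod q.1 8) 0 == q.2 then acc + 1 else acc)
      (g := fun (acc : Int) (q : Int × Int) =>
        if PySem.List.pyGetD ([3,3,1,1,2,2,4,4,5,5] : List Int) (PySem.Int.mod q.1 10) 0 == q.2 then acc + 1 else acc)]
  rw [pv_score_eq [1,2,3,4,5] (by simp) 5 (by norm_num),
      pv_score_eq [2,1,2,3,2,4,2,5] (by simp) 8 (by norm_num),
      pv_score_eq [3,3,1,1,2,2,4,4,5,5] (by simp) 10 (by norm_num)]

theorem solution_spec : Claim_equal_solution := by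
  intro answers _
  unfold Spec_solution solution solution_alt
  simp only [List.map]
  rw [pv_solve_eq answers]
  rfl
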